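-- pv_equiv track=rewrite | github.com/luckylukezzz/HackerRank-python-practise | Strings/08-Text Wrap/Text Wrap.py | wrap
-- ===== SOURCE A (Python) =====
-- def wrap(string, max_width):
--     count=0
--     x=''
--     l=[]
--     for i in string:
--         x=x+i
--         count+=1
--         if count==max_width:
--             l.append(x)
--             x=''
--             count=0
--     l.append(x)
--
--
--
--
--     return "\n".join(l)
-- ===== SOURCE B (Python) =====
-- def wrap(string, max_width):
--     n = len(string) // max_width
--     lines = [string[i * max_width:(i + 1) * max_width] for i in range(n)]
--     lines.append(string[n * max_width:])
--     return "\n".join(lines)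
-- ===== Notes on version B (the rewrite author's own statement) =====
-- stated objective: simpler
-- what changed: Replaces the char-by-char accumulator loop (counter, partial chunk, reset on overflow) by direct strided slicing: n = len//width full slices plus the unconditional remainder slice, joined.
-- outside the precondition, e.g. on wrap('abc', 0): A returns 'abc', B raises ZeroDivisionError; on wrap('abcd', -2): A returns 'abcd', B returns ''
import Mathlib
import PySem

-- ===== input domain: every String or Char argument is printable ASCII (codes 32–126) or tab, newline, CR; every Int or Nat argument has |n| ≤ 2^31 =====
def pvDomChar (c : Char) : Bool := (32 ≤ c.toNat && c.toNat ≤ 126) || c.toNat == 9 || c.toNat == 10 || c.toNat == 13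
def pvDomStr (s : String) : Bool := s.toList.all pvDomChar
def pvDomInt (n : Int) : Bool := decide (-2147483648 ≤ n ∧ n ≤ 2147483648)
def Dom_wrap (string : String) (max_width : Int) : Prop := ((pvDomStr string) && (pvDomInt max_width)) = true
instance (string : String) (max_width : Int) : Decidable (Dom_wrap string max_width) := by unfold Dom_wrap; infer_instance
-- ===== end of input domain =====

-- B wraps by direct strided slicing (n = len//width full slices plus the remainder slice) instead of
-- A's char-by-char accumulator loop; objective: simpler. Equal on all positive widths (Pre_wrap).

-- ===== PORT A =====
-- state = (count, x, l), exactly A's three loop variables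
def wrapStepA (max_width : Int) (st : Int × List Char × List (List Char)) (c : Char) :
    Int × List Char × List (List Char) :=
  let x := st.2.1 ++ [c]
  let count := st.1 + 1
  if count == max_width then (0, [], st.2.2 ++ [x]) else (count, x, st.2.2)

def wrap (string : String) (max_width : Int) : String :=
  let st := string.toList.foldl (wrapStepA max_width) (0, [], [])
  let l := st.2.2 ++ [st.2.1]
  PySem.Str.join "\n" (l.map String.ofList)

-- ===== PORT B =====
def wrap_alt (string : String) (max_width : Int) : String :=
  let n := PySem.Int.floordiv (PySem.Str.len string) max_width
  let lines := (PySem.List.pyRange 0 n 1).map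
    (fun i => PySem.Str.slice string (some (i * max_width)) (some ((i + 1) * max_width)))
  PySem.Str.join "\n" (lines ++ [PySem.Str.slice string (some (n * max_width)) none])

-- ===== PRECONDITION & SPEC =====
-- Pre_ restricts to positive widths, the natural domain of text wrapping; for max_width ≤ 0 A
-- degenerately returns the whole string as one line while B's slice arithmetic divides by zero
-- (max_width = 0) or yields an empty tail (negative widths).
def Pre_wrap (string : String) (max_width : Int) : Prop := 1 ≤ max_width
instance (string : String) (max_width : Int) : Decidable (Pre_wrap string max_width) := by
  unfold Pre_wrap; infer_instance

def pvWitness_wrap : String × Int := ("hello world", 3)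

def Spec_wrap (string : String) (max_width : Int) (out : String) : Prop := out = wrap_alt string max_width
instance (string : String) (max_width : Int) (out : String) : Decidable (Spec_wrap string max_width out) := by unfold Spec_wrap; infer_instance

-- ===== CLAIM (what is proved, stated in full; the proofs are below) =====
def Claim_equal_wrap : Prop := ∀ (string : String) (max_width : Int), Dom_wrap string max_width → Pre_wrap string max_width → Spec_wrap string max_width (wrap string max_width)

-- ===== LEMMAS AND PROOFS =====

-- common characterisation: the list of width-w chunks (w ≥ 1 in all uses)
def chunks (w : Nat) (cs : List Char) : List (List Char) :=
  if _h : cs.length < w ∨ w = 0 then [cs]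
  else cs.take w :: chunks w (cs.drop w)
termination_by cs.length
decreasing_by simp_all; omega

theorem chunks_small {w : Nat} {cs : List Char} (h : cs.length < w) : chunks w cs = [cs] := by
  rw [chunks]; simp [h]

theorem chunks_big {w : Nat} {cs : List Char} (hw : 1 ≤ w) (h : w ≤ cs.length) :
    chunks w cs = cs.take w :: chunks w (cs.drop w) := by
  rw [chunks]; rw [dif_neg (by omega)]

-- A's loop produces exactly the chunks
theorem foldA_chunks (w : Int) (hw : 1 ≤ w) :
    ∀ (cs x : List Char) (l : List (List Char)), x.length < w.toNat →
      (cs.foldl (wrapStepA w) ((x.length : Int), x, l)).2.2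
        ++ [(cs.foldl (wrapStepA w) ((x.length : Int), x, l)).2.1]
      = l ++ chunks w.toNat (x ++ cs) := by
  intro cs
  induction cs with
  | nil =>
    intro x l hx
    simp [chunks_small hx]
  | cons c cs ih =>
    intro x l hx
    simp only [List.foldl_cons]
    by_cases hfull : x.length + 1 = w.toNat
    · have hcond : ((x.length : Int) + 1 == w) = true := by simp; omega
      have hstep : wrapStepA w ((x.length : Int), x, l) c = (0, [], l ++ [x ++ [c]]) := by
        simp [wrapStepA, hcond]
      rw [hstep]
      have h := ih [] (l ++ [x ++ [c]]) (by simp; omega)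
      simp only [List.length_nil, Int.natCast_zero, List.nil_append] at h
      rw [h]
      have hbig : w.toNat ≤ (x ++ c :: cs).length := by simp; omega
      rw [chunks_big (by omega) hbig]
      have hsplit : x ++ c :: cs = (x ++ [c]) ++ cs := by simp
      have htake : (x ++ c :: cs).take w.toNat = x ++ [c] := by
        rw [hsplit, List.take_append_of_le_length (by simp; omega)]
        exact List.take_of_length_le (by simp; omega)
      have hdrop : (x ++ c :: cs).drop w.toNat = cs := by
        rw [hsplit, ← hfull]
        simp
      rw [htake, hdrop]
      simp
    · have hcond : ((x.length : Int) + 1 == w) = false := by simp; omega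
      have hstep : wrapStepA w ((x.length : Int), x, l) c
          = ((x.length : Int) + 1, x ++ [c], l) := by
        simp [wrapStepA, hcond]
      rw [hstep]
      have h := ih (x ++ [c]) l (by simp; omega)
      simp only [List.length_append, List.length_cons, List.length_nil, Nat.zero_add,
        Int.natCast_add, Int.natCast_one] at h
      rw [h]
      simp

-- one full slice, in Nat terms
theorem slice_elt (w : Int) (hw : 1 ≤ w) (cs : List Char) (j : Nat) :
    PySem.List.slice cs (some ((j : Int) * w)) (some (((j : Int) + 1) * w))
      = (cs.drop (j * w.toNat)).take w.toNat := by
  have hwn : ((w.toNat : Nat) : Int) = w := Int.toNat_of_nonneg (by omega)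
  rw [show (j : Int) * w = ((j * w.toNat : Nat) : Int) by push_cast [hwn]; ring,
      show ((j : Int) + 1) * w = ((j * w.toNat : Nat) : Int) + ((w.toNat : Nat) : Int) by
        push_cast [hwn]; ring]
  rw [PySem.List.slice_natCast_add]

-- the tail slice, in Nat terms
theorem slice_tail (w : Int) (hw : 1 ≤ w) (cs : List Char) (k : Nat) :
    PySem.List.slice cs (some ((k : Int) * w)) none = cs.drop (k * w.toNat) := by
  have hwn : ((w.toNat : Nat) : Int) = w := Int.toNat_of_nonneg (by omega)
  rw [show (k : Int) * w = ((k * w.toNat : Nat) : Int) by push_cast [hwn]; ring]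
  exact PySem.List.slice_from_natCast cs _

-- B's comprehension, rephrased over List.range with Nat arithmetic
theorem lines_formula (w : Int) (hw : 1 ≤ w) (k : Nat) (cs : List Char) :
    (PySem.List.pyRange 0 (k : Int) 1).map
        (fun i => PySem.List.slice cs (some (i * w)) (some ((i + 1) * w)))
      = (List.range k).map (fun j => (cs.drop (j * w.toNat)).take w.toNat) := by
  rw [PySem.List.pyRange_one]
  simp only [Int.sub_zero, Int.toNat_natCast, List.map_map]
  refine List.map_congr_left (fun j _ => ?_)
  simp only [Function.comp_apply, Int.zero_add]
  exact slice_elt w hw cs j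

-- the chunks, counted: k = len / w full chunks plus the remainder
theorem range_chunks (w : Nat) (hw : 1 ≤ w) :
    ∀ (k : Nat) (cs : List Char), cs.length / w = k →
      (List.range k).map (fun j => (cs.drop (j * w)).take w) ++ [cs.drop (k * w)]
        = chunks w cs := by
  intro k
  induction k with
  | zero =>
    intro cs hk
    have hsmall : cs.length < w := by
      by_contra h
      have := Nat.one_le_div_iff (by omega : 0 < w) |>.mpr (by omega : w ≤ cs.length)
      omega
    rw [chunks_small hsmall]
    simp
  | succ k ih =>
    intro cs hk
    have hbig : w ≤ cs.length := by
      by_contra h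
      rw [Nat.div_eq_of_lt (by omega)] at hk; omega
    have hdiv : (cs.drop w).length / w = k := by
      rw [List.length_drop]
      have h1 := Nat.div_add_mod cs.length w
      have hm : cs.length % w < w := Nat.mod_lt _ (by omega)
      rw [hk] at h1
      have h2 : cs.length - w = cs.length % w + k * w := by ring_nf at h1 ⊢; omega
      rw [h2, Nat.add_mul_div_right _ _ (by omega : 0 < w), Nat.div_eq_of_lt hm]
      omega
    rw [chunks_big hw hbig, ← ih (cs.drop w) hdiv]
    rw [List.range_succ_eq_map]
    simp only [List.map_cons, List.map_map, List.cons_append, Nat.zero_mul, List.drop_zero]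
    congr 1
    congr 1
    · refine List.map_congr_left (fun j _ => ?_)
      simp only [Function.comp_apply, Nat.succ_eq_add_one]
      rw [List.drop_drop]
      congr 1
      ring_nf
    · rw [List.drop_drop]
      congr 1
      ring_nf

-- lists of strings are equal once their character lists are
theorem map_toList_inj {s t : List String} (h : s.map String.toList = t.map String.toList) :
    s = t := by
  refine List.map_injective_iff.mpr (fun a b hab => ?_) h
  exact String.ext (by simpa [String.toList] using hab)

theorem floordiv_len (w : Int) (hw : 1 ≤ w) (s : String) :
    PySem.Int.floordiv (PySem.Str.len s) w = ((s.toList.length / w.toNat : Nat) : Int) := by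
  have hlen : PySem.Str.len s = (s.toList.length : Int) := by simp
  rw [hlen]
  show Int.fdiv _ _ = _
  rw [Int.fdiv_eq_ediv_of_nonneg _ (by omega)]
  rw [show ((s.toList.length : Int)) = (((s.toList.length : Nat) : Int)) by simp,
      show w = ((w.toNat : Nat) : Int) by omega]
  rw [← Int.natCast_div]
  simp

-- ===== VERDICT (by name: the statement is the Claim_ definition above) =====
theorem wrap_spec : Claim_equal_wrap := by
  unfold Claim_equal_wrap
  intro s w _ hw
  unfold Pre_wrap at hw
  unfold Spec_wrap
  show wrap s w = wrap_alt s w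
  unfold wrap wrap_alt
  simp only [floordiv_len w hw s]
  apply congrArg (PySem.Str.join "\n")
  apply map_toList_inj
  have hid : String.toList ∘ String.ofList = id := by funext cs; simp
  trans (chunks w.toNat s.toList)
  · rw [List.map_map, hid, List.map_id]
    have h := foldA_chunks w hw s.toList [] [] (by simp; omega)
    simpa using h
  · symm
    rw [List.map_append, List.map_map, List.map_singleton]
    simp only [Function.comp_def, PySem.Str.toList_slice, PySem.Chars.slice_eq_listSlice]
    rw [lines_formula w hw _ s.toList, slice_tail w hw s.toList]
    exact range_chunks w.toNat (by omega) _ s.toList rfl
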